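-- pv_equiv track=rewrite | github.com/wilmurillo-ai/Design-Assistant | .skills/openclaw-skills/skills/lj22503/investment-framework-skill/portfolio-designer/scripts/design.py | yale_model_allocation
-- ===== SOURCE A (Python) =====
-- def yale_model_allocation(risk_profile: str = 'moderate') -> dict:
--     """
--     耶鲁模式配置
--
--     Args:
--         risk_profile: 风险档案（conservative/moderate/aggressive）
--
--     Returns:
--         配置字典
--     """
--     # 标准耶鲁模式
--     base_allocation = {
--         'us_stocks': 18,
--         'international_stocks': 23,
--         'bonds': 15,
--         'real_estate': 21,
--         'alternatives': 23,
--     }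
--
--     # 根据风险档案调整
--     adjustments = {
--         'conservative': {
--             'us_stocks': -5,
--             'international_stocks': -5,
--             'bonds': +10,
--             'real_estate': 0,
--             'alternatives': 0,
--         },
--         'moderate': {
--             'us_stocks': 0,
--             'international_stocks': 0,
--             'bonds': 0,
--             'real_estate': 0,
--             'alternatives': 0,
--         },
--         'aggressive': {
--             'us_stocks': +5,
--             'international_stocks': +5,
--             'bonds': -10,
--             'real_estate': 0,
--             'alternatives': 0,
--         },
--     }
--
--     adj = adjustments.get(risk_profile, adjustments['moderate'])
--
--     result = {}
--     for key in base_allocation: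
--         result[key] = max(0, base_allocation[key] + adj.get(key, 0))
--
--     # 确保总和为 100%
--     total = sum(result.values())
--     if total != 100:
--         # 调整债券比例使总和为 100
--         result['bonds'] += (100 - total)
--
--     return result
-- ===== SOURCE B (Python) =====
-- # B: closed-form table lookup — each profile maps directly to its final allocation; default to moderate.
-- _YALE_TABLE = {
--     'conservative': {'us_stocks': 13, 'international_stocks': 18, 'bonds': 25, 'real_estate': 21, 'alternatives': 23},
--     'moderate': {'us_stocks': 18, 'international_stocks': 23, 'bonds': 15, 'real_estate': 21, 'alternatives': 23},
--     'aggressive': {'us_stocks': 23, 'international_stocks': 28, 'bonds': 5, 'real_estate': 21, 'alternatives': 23},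
-- }
--
-- def yale_model_allocation(risk_profile: str = 'moderate') -> dict:
--     return dict(_YALE_TABLE.get(risk_profile, _YALE_TABLE['moderate']))
-- ===== Notes on version B (the rewrite author's own statement) =====
-- stated objective: simpler
-- what changed: Replaced the base-allocation + per-key adjustment loop + sum-normalization step by a precomputed closed-form table mapping each risk profile to its final allocation, with a moderate fallback.
import Mathlib
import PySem

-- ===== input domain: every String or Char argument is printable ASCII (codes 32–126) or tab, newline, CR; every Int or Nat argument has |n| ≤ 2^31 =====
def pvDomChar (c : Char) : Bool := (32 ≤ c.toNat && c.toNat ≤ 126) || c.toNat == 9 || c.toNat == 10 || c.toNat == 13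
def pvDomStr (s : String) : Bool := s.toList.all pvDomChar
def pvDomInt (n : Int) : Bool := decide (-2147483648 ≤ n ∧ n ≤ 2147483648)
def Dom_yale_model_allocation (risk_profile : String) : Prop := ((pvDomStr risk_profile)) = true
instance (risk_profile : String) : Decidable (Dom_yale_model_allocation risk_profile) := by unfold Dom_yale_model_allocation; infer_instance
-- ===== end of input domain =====

-- B replaces the base+adjustment loop and normalization by a direct profile->allocation table lookup (simpler).
-- ===== PORT A =====
def pvBaseAllocation : PySem.Dict String Int := PySem.Dict.ofList
  [("us_stocks", 18), ("international_stocks", 23), ("bonds", 15), ("real_estate", 21), ("alternatives", 23)]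

def pvAdjustments : PySem.Dict String (PySem.Dict String Int) := PySem.Dict.ofList
  [("conservative", PySem.Dict.ofList [("us_stocks", -5), ("international_stocks", -5), ("bonds", 10), ("real_estate", 0), ("alternatives", 0)]),
   ("moderate", PySem.Dict.ofList [("us_stocks", 0), ("international_stocks", 0), ("bonds", 0), ("real_estate", 0), ("alternatives", 0)]),
   ("aggressive", PySem.Dict.ofList [("us_stocks", 5), ("international_stocks", 5), ("bonds", -10), ("real_estate", 0), ("alternatives", 0)])]

def yale_model_allocation (risk_profile : String) : List (String × Int) :=
  let adj := (pvAdjustments.get? risk_profile).getD (pvAdjustments.getD "moderate" PySem.Dict.empty)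
  let result := pvBaseAllocation.keys.foldl
    (fun r key => r.insert key (max 0 (pvBaseAllocation.getD key 0 + adj.getD key 0))) PySem.Dict.empty
  let total := result.values.sum
  let result := if total ≠ 100 then result.modify "bonds" 0 (· + (100 - total)) else result
  result.items

-- ===== PORT B =====
def yaleTable : PySem.Dict String (List (String × Int)) := PySem.Dict.ofList
  [("conservative", [("us_stocks", 13), ("international_stocks", 18), ("bonds", 25), ("real_estate", 21), ("alternatives", 23)]),
   ("moderate", [("us_stocks", 18), ("international_stocks", 23), ("bonds", 15), ("real_estate", 21), ("alternatives", 23)]),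
   ("aggressive", [("us_stocks", 23), ("international_stocks", 28), ("bonds", 5), ("real_estate", 21), ("alternatives", 23)])]

def yale_model_allocation_alt (risk_profile : String) : List (String × Int) :=
  yaleTable.getD risk_profile (yaleTable.getD "moderate" [])

-- ===== PRECONDITION & SPEC =====
def Spec_yale_model_allocation (risk_profile : String) (out : List (String × Int)) : Prop := out = yale_model_allocation_alt risk_profile
instance (risk_profile : String) (out : List (String × Int)) : Decidable (Spec_yale_model_allocation risk_profile out) := by unfold Spec_yale_model_allocation; infer_instance

-- ===== CLAIM (what is proved, stated in full; the proofs are below) =====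
def Claim_equal_yale_model_allocation : Prop := ∀ (risk_profile : String), Dom_yale_model_allocation risk_profile → Spec_yale_model_allocation risk_profile (yale_model_allocation risk_profile)

-- ===== LEMMAS AND PROOFS =====

-- ===== VERDICT (by name: the statement is the Claim_ definition above) =====
lemma adj_get?_none (rp : String) (h1 : rp ≠ "conservative") (h2 : rp ≠ "moderate")
    (h3 : rp ≠ "aggressive") : pvAdjustments.get? rp = none := by
  rw [PySem.Dict.get?_eq_none_iff_not_mem_keys]
  have hk : pvAdjustments.keys = ["conservative", "moderate", "aggressive"] := rfl
  rw [hk]; simp [h1, h2, h3]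

lemma table_get?_none (rp : String) (h1 : rp ≠ "conservative") (h2 : rp ≠ "moderate")
    (h3 : rp ≠ "aggressive") : yaleTable.get? rp = none := by
  rw [PySem.Dict.get?_eq_none_iff_not_mem_keys]
  have hk : yaleTable.keys = ["conservative", "moderate", "aggressive"] := rfl
  rw [hk]; simp [h1, h2, h3]

theorem yale_model_allocation_spec : Claim_equal_yale_model_allocation := by
  intro rp _
  unfold Spec_yale_model_allocation
  by_cases h1 : rp = "conservative"
  · subst h1; decide
  by_cases h2 : rp = "moderate"
  · subst h2; decide
  by_cases h3 : rp = "aggressive"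
  · subst h3; decide
  simp only [yale_model_allocation, yale_model_allocation_alt,
    PySem.Dict.getD_eq_get?_getD, adj_get?_none rp h1 h2 h3, table_get?_none rp h1 h2 h3,
    Option.getD_none]
  decide
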